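-- pv_equiv track=rewrite | github.com/manwar/perlweeklychallenge-club | challenge-104/lubos-kolouch/python/ch-1.py | fusc_first
-- ===== SOURCE A (Python) =====
-- from typing import List, Sequence
--
-- def fusc_first(count: int) -> List[int]:
--     """Return the first `count` values of the FUSC sequence."""
--     if count < 0:
--         raise ValueError("count must be >= 0")
--     if count == 0:
--         return []
--     if count == 1:
--         return [0]
--
--     values = [0] * count
--     values[0] = 0
--     values[1] = 1
--
--     for n in range(2, count):
--         if n % 2 == 0:
--             values[n] = values[n // 2]
--         else:
--             values[n] = values[(n - 1) // 2] + values[(n + 1) // 2]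
--
--     return values
-- ===== SOURCE B (Python) =====
-- from typing import List
--
-- def fusc_first(count: int) -> List[int]:
--     """Return the first `count` values of the FUSC sequence."""
--     if count < 0:
--         raise ValueError("count must be >= 0")
--     out = []
--     for n in range(count):
--         a, b = 1, 0
--         while n:
--             if n & 1:
--                 b += a
--             else:
--                 a += b
--             n >>= 1
--         out.append(b)
--     return out
-- ===== Notes on version B (the rewrite author's own statement) =====
-- stated objective: alternative
-- what changed: B computes each fusc(n) independently from the binary digits of n with a two-accumulator loop, instead of A's table filled by the even/odd index recurrence.
import Mathlib
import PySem

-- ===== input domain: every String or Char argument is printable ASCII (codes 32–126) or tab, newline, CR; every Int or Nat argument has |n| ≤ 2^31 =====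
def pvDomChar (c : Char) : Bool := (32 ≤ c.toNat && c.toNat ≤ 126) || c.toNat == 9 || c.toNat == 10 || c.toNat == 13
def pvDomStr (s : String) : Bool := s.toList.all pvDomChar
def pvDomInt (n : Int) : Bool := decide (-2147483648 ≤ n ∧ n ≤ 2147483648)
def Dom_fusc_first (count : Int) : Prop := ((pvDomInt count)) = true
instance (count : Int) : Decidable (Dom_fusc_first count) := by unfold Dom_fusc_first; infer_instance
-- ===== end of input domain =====

-- B derives each fusc(n) independently from the binary digits of n (two-accumulator loop)
-- instead of A's table filled by the even/odd index recurrence; objective: alternative algorithm.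

-- ===== PORT A =====
-- the body of A's for-loop: values[n] = … (assignment ported as List.set at the in-range index)
def pvStepA (vals : List Int) (n : Int) : List Int :=
  if PySem.Int.mod n 2 = 0 then
    vals.set n.toNat (PySem.List.pyGetD vals (PySem.Int.floordiv n 2) 0)
  else
    vals.set n.toNat (PySem.List.pyGetD vals (PySem.Int.floordiv (n - 1) 2) 0 +
                      PySem.List.pyGetD vals (PySem.Int.floordiv (n + 1) 2) 0)

def fusc_first (count : Int) : List Int :=
  -- count < 0 raises ValueError in Python: excluded by Pre_fusc_first
  if count = 0 then []
  else if count = 1 then [0]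
  else
    (PySem.List.pyRange 2 count 1).foldl pvStepA
      (((List.replicate count.toNat 0).set 0 0).set 1 1)

-- ===== PORT B =====
-- the while-loop of B: a,b = 1,0; while n: if n&1: b+=a else: a+=b; n>>=1; result b
def pvFuscGo (n : Nat) (a b : Int) : Int :=
  if h : n = 0 then b
  else if n % 2 = 1 then pvFuscGo (n / 2) a (b + a) else pvFuscGo (n / 2) (a + b) b
termination_by n
decreasing_by all_goals exact Nat.div_lt_self (Nat.pos_of_ne_zero h) (by norm_num)

def fusc_first_alt (count : Int) : List Int :=
  -- count < 0 raises ValueError in Python: excluded by Pre_fusc_first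
  (List.range count.toNat).map (fun n => pvFuscGo n 1 0)

-- ===== PRECONDITION & SPEC =====
-- Python A (and B) raise ValueError exactly when count < 0
def Pre_fusc_first (count : Int) : Prop := 0 ≤ count
instance (count : Int) : Decidable (Pre_fusc_first count) := by unfold Pre_fusc_first; infer_instance
def pvWitness_fusc_first : Int := (6)

def Spec_fusc_first (count : Int) (out : List Int) : Prop := out = fusc_first_alt count
instance (count : Int) (out : List Int) : Decidable (Spec_fusc_first count out) := by
  unfold Spec_fusc_first; infer_instance

-- ===== CLAIM (what is proved, stated in full; the proofs are below) =====
def Claim_equal_fusc_first : Prop :=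
  ∀ (count : Int), Dom_fusc_first count → Pre_fusc_first count →
    Spec_fusc_first count (fusc_first count)

-- ===== LEMMAS AND PROOFS =====

-- mathematical fusc, mirroring A's recurrence
def pvFusc (n : Nat) : Int :=
  if n = 0 then 0
  else if n = 1 then 1
  else if n % 2 = 0 then pvFusc (n / 2)
  else pvFusc ((n - 1) / 2) + pvFusc ((n + 1) / 2)
termination_by n
decreasing_by all_goals omega

theorem pvFusc_zero : pvFusc 0 = 0 := by simp [pvFusc]
theorem pvFusc_one : pvFusc 1 = 1 := by simp [pvFusc]

theorem pvFusc_even (m : Nat) (hm : 1 ≤ m) : pvFusc (2 * m) = pvFusc m := by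
  rw [pvFusc]
  have h0 : ¬ (2 * m = 0) := by omega
  have h1 : ¬ (2 * m = 1) := by omega
  have h2 : 2 * m % 2 = 0 := by omega
  simp [h0, h1, h2]

theorem pvFusc_odd (m : Nat) : pvFusc (2 * m + 1) = pvFusc m + pvFusc (m + 1) := by
  rcases Nat.eq_zero_or_pos m with h | h
  · subst h; simp [pvFusc]
  · rw [pvFusc]
    have h0 : ¬ (2 * m + 1 = 0) := by omega
    have h1 : ¬ (2 * m + 1 = 1) := by omega
    have h2 : ¬ ((2 * m + 1) % 2 = 0) := by omega
    have e1 : (2 * m + 1 - 1) / 2 = m := by omega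
    have e2 : (2 * m + 1 + 1) / 2 = m + 1 := by omega
    simp [e2]
    intro hm0
    omega

theorem pvFuscGo_eq (n : Nat) : ∀ a b : Int, pvFuscGo n a b = a * pvFusc n + b * pvFusc (n + 1) := by
  induction n using Nat.strong_induction_on with
  | _ n ih =>
    intro a b
    rw [pvFuscGo]
    by_cases h0 : n = 0
    · simp [h0, pvFusc_zero, pvFusc_one]
    · by_cases hodd : n % 2 = 1
      · obtain ⟨m, rfl⟩ : ∃ m, n = 2 * m + 1 := ⟨n / 2, by omega⟩
        rw [dif_neg h0, if_pos hodd, show (2 * m + 1) / 2 = m by omega,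
            ih m (by omega), pvFusc_odd,
            show 2 * m + 1 + 1 = 2 * (m + 1) by ring, pvFusc_even _ (by omega)]
        ring
      · obtain ⟨m, rfl⟩ : ∃ m, n = 2 * m := ⟨n / 2, by omega⟩
        rw [dif_neg h0, if_neg hodd, show 2 * m / 2 = m by omega,
            ih m (by omega), pvFusc_even _ (by omega), pvFusc_odd]
        ring

theorem pvFuscGo_spec (n : Nat) : pvFuscGo n 1 0 = pvFusc n := by
  rw [pvFuscGo_eq]; ring

-- the state of A's loop after processing indices 2..k (table of length c)
def pvTab (c k : Nat) : List Int := (List.range k).map pvFusc ++ List.replicate (c - k) 0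

theorem pvTab_getD (c k i : Nat) (hik : i < k) : (pvTab c k).getD i 0 = pvFusc i := by
  unfold pvTab
  rw [List.getD_eq_getElem?_getD, List.getElem?_append_left (by simpa using hik)]
  simp [hik]

theorem pvStepA_tab (c k : Nat) (h2 : 2 ≤ k) (hk : k < c) :
    pvStepA (pvTab c k) (k : Int) = pvTab c (k + 1) := by
  have hset : ∀ x : Int, (pvTab c k).set k x =
      (List.range k).map pvFusc ++ x :: List.replicate (c - (k + 1)) 0 := by
    intro x
    unfold pvTab
    rw [List.set_append, if_neg (by simp)]
    simp only [List.length_map, List.length_range, Nat.sub_self]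
    have : c - k = (c - (k + 1)) + 1 := by omega
    rw [this, List.replicate_succ, List.set_cons_zero]
  have htab : pvTab c (k + 1) =
      (List.range k).map pvFusc ++ pvFusc k :: List.replicate (c - (k + 1)) 0 := by
    unfold pvTab
    rw [List.range_succ, List.map_append]
    simp
  unfold pvStepA
  have hmod : PySem.Int.mod (k : Int) 2 = ((k % 2 : Nat) : Int) := PySem.Int.mod_natCast k 2
  by_cases he : k % 2 = 0
  · rw [if_pos (by rw [hmod, he]; rfl)]
    have hd : PySem.Int.floordiv (k : Int) 2 = ((k / 2 : Nat) : Int) := PySem.Int.floordiv_natCast k 2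
    rw [hd, PySem.List.pyGetD_natCast, Int.toNat_natCast]
    rw [pvTab_getD c k (k / 2) (by omega), hset, htab]
    have : pvFusc (k / 2) = pvFusc k := by
      conv_rhs => rw [show k = 2 * (k / 2) by omega]
      rw [pvFusc_even _ (by omega)]
    rw [this]
  · rw [if_neg (by rw [hmod]; omega)]
    have hd1 : PySem.Int.floordiv ((k : Int) - 1) 2 = (((k - 1) / 2 : Nat) : Int) := by
      rw [show ((k : Int) - 1) = ((k - 1 : Nat) : Int) by omega]
      exact PySem.Int.floordiv_natCast (k - 1) 2
    have hd2 : PySem.Int.floordiv ((k : Int) + 1) 2 = (((k + 1) / 2 : Nat) : Int) := by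
      rw [show ((k : Int) + 1) = ((k + 1 : Nat) : Int) by omega]
      exact PySem.Int.floordiv_natCast (k + 1) 2
    rw [hd1, hd2, PySem.List.pyGetD_natCast, PySem.List.pyGetD_natCast,
        Int.toNat_natCast]
    rw [pvTab_getD c k ((k - 1) / 2) (by omega), pvTab_getD c k ((k + 1) / 2) (by omega),
        hset, htab]
    have : pvFusc ((k - 1) / 2) + pvFusc ((k + 1) / 2) = pvFusc k := by
      conv_rhs => rw [show k = 2 * ((k - 1) / 2) + 1 by omega]
      rw [pvFusc_odd]
      congr 2
      omega
    rw [this]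

theorem pvFold_tab (c : Nat) : ∀ k : Nat, 2 ≤ k → k ≤ c →
    (PySem.List.pyRange 2 (k : Int) 1).foldl pvStepA (pvTab c 2) = pvTab c k := by
  intro k
  induction k with
  | zero => omega
  | succ k ih =>
    intro h2 hk
    rcases Nat.lt_or_ge k 2 with h | h
    · have : k + 1 = 2 := by omega
      rw [this]
      rw [PySem.List.pyRange_one_eq_nil (by norm_num)]
      rfl
    · rw [show ((k + 1 : Nat) : Int) = (k : Int) + 1 by push_cast; ring]
      rw [PySem.List.pyRange_one_succ_right (by exact_mod_cast h)]
      rw [List.foldl_append, ih h (by omega)]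
      simpa using pvStepA_tab c k h hk

theorem pvInit_eq_tab (c : Nat) (hc : 2 ≤ c) :
    ((List.replicate c 0).set 0 0).set 1 1 = pvTab c 2 := by
  obtain ⟨d, rfl⟩ : ∃ d, c = d + 2 := ⟨c - 2, by omega⟩
  unfold pvTab
  rw [List.replicate_succ, List.replicate_succ]
  simp [List.range_succ, pvFusc_zero, pvFusc_one]

theorem fusc_first_eq_map (count : Int) (h : 0 ≤ count) :
    fusc_first count = (List.range count.toNat).map pvFusc := by
  unfold fusc_first
  by_cases h0 : count = 0
  · simp [h0]
  · by_cases h1 : count = 1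
    · subst h1
      simp [h0, List.range_succ, pvFusc_zero]
    · rw [if_neg h0, if_neg h1]
      have hc : 2 ≤ count.toNat := by omega
      rw [pvInit_eq_tab count.toNat hc]
      have := pvFold_tab count.toNat count.toNat hc (le_refl _)
      rw [show ((count.toNat : Nat) : Int) = count by omega] at this
      rw [this]
      unfold pvTab
      simp

-- ===== VERDICT (by name: the statement is the Claim_ definition above) =====
theorem fusc_first_spec : Claim_equal_fusc_first := by
  intro count _ hpre
  unfold Spec_fusc_first fusc_first_alt
  rw [fusc_first_eq_map count hpre]
  exact List.map_congr_left (fun n _ => (pvFuscGo_spec n).symm)
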